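-- pv_equiv track=rewrite | github.com/louisVottero/vtool | python/vtool/util_file.py | remove_common_path
-- ===== SOURCE A (Python) =====
-- def remove_common_path(path1, path2):
--     """
--     Given path1 = pathA/pathB
--     and path2 = pathA/pathC
--
--     or path1 = pathA
--     and path2 = pathA/pathC
--
--     return pathC
--     """
--
--
--     path1 = fix_slashes(path1)
--     path2 = fix_slashes(path2)
--
--     split_path1 = path1.split('/')
--     split_path2 = path2.split('/')
--
--     skip = True
--     new_path = []
--
--     for inc in range(0, len(split_path2)):
--
--         if skip:
--             if len(split_path1) > inc:
--                 if split_path1[inc] != split_path2[inc]: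
--                     skip = False
--
--             if (len(split_path1)-1) < inc:
--                 skip = False
--
--         if not skip:
--             new_path.append(split_path2[inc])
--
--     new_path = '/'.join(new_path)
--
--     return new_path
--
-- def fix_slashes(directory):
--     """
--     Fix slashes in a path so the are all /
--
--     Returns:
--         str: The new directory path.
--     """
--
--     if not directory:
--         return
--
--     directory = directory.replace('\\','/')
--     directory = directory.replace('//','/')
--
--     return directory
-- ===== SOURCE B (Python) =====
-- def fix_slashes(directory):
--     if not directory:
--         return
--
--     directory = directory.replace('\\', '/')
--     directory = directory.replace('//', '/')
--
--     return directory
--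
--
-- def remove_common_path(path1, path2):
--     p1 = fix_slashes(path1)
--     p2 = fix_slashes(path2)
--
--     while True:
--         head1, sep1, tail1 = p1.partition('/')
--         head2, sep2, tail2 = p2.partition('/')
--         if head1 != head2:
--             return p2
--         if not sep2:
--             return ''
--         if not sep1:
--             return tail2
--         p1, p2 = tail1, tail2
-- ===== Notes on version B (the rewrite author's own statement) =====
-- stated objective: alternative
-- what changed: A splits both paths into component lists and runs a flag-driven indexed loop appending path2 components which it finally joins; B never splits or joins at all: it peels equal leading components off both normalized strings with str.partition('/') in a while loop and returns the remaining substring of path2 directly.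
import Mathlib
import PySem

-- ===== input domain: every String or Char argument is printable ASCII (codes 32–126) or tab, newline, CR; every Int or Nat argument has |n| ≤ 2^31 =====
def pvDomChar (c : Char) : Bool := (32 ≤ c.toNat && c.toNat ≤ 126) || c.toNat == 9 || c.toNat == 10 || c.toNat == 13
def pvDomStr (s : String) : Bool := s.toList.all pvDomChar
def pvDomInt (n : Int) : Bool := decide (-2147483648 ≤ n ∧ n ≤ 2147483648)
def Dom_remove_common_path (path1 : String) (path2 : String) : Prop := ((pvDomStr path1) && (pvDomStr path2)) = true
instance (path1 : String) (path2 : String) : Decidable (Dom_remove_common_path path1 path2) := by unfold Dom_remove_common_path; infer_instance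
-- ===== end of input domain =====

-- B never splits or joins: it peels equal leading components off both normalized path
-- STRINGS with partition('/') and returns the remainder of path2 directly (objective: simpler).

-- ===== PORT A =====
-- fix_slashes: none = Python's `return` (None) on the empty string; some = the slash-fixed path
def fix_slashes (directory : String) : Option String :=
  if directory = "" then none
  else some (PySem.Str.replace (PySem.Str.replace directory "\\" "/") "//" "/")

-- the body of A's `for inc in range(0, len(split_path2))` loop, state = (skip, new_path)
def pvBodyA (split_path1 split_path2 : List String) (st : Bool × List String) (inc : Int) :
    Bool × List String :=
  let skip := st.1
  let skip :=
    if skip then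
      let skip :=
        if (split_path1.length : Int) > inc then
          if PySem.List.pyGetD split_path1 inc "" ≠ PySem.List.pyGetD split_path2 inc "" then
            false
          else skip
        else skip
      if (split_path1.length : Int) - 1 < inc then false else skip
    else skip
  if !skip then (skip, st.2 ++ [PySem.List.pyGetD split_path2 inc ""]) else (skip, st.2)

def remove_common_path (path1 : String) (path2 : String) : String :=
  match fix_slashes path1, fix_slashes path2 with
  | some path1, some path2 =>
    let split_path1 := (PySem.Str.split? path1 "/").getD []
    let split_path2 := (PySem.Str.split? path2 "/").getD []
    let st := (PySem.List.pyRange 0 (split_path2.length : Int) 1).foldl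
                (pvBodyA split_path1 split_path2) (true, [])
    PySem.Str.join "/" st.2
  | _, _ => ""   -- Python raises AttributeError here (fix_slashes returned None); excluded by Pre_

-- ===== PORT B =====
-- B's own fix_slashes (Source B defines it itself; kept separate so neither port reaches the other)
def fix_slashes_b (directory : String) : Option String :=
  if directory = "" then none
  else some (PySem.Str.replace (PySem.Str.replace directory "\\" "/") "//" "/")

-- p.partition('/') on code points: (head, sep found?, tail) — exact for the one-char separator
def pvPart : List Char → List Char × Bool × List Char
  | [] => ([], false, [])
  | c :: rest =>
    if c = '/' then ([], true, rest)
    else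
      let p := pvPart rest
      (c :: p.1, p.2.1, p.2.2)

-- termination helper for pvLoopB (cited in decreasing_by)
lemma pvPart_sep_len : ∀ l : List Char, (pvPart l).2.1 = true → (pvPart l).2.2.length < l.length := by
  intro l
  induction l with
  | nil => simp [pvPart]
  | cons c rest ih =>
    by_cases h : c = '/'
    · simp [pvPart, h]
    · simp only [pvPart, if_neg h]
      intro hs
      have := ih hs
      simpa using Nat.lt_succ_of_lt this

-- Source B's `while True` loop: compare heads, early-return, else recurse on both tails
def pvLoopB (l1 l2 : List Char) : List Char :=
  if (pvPart l1).1 ≠ (pvPart l2).1 then l2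
  else if (pvPart l2).2.1 = false then []
  else if (pvPart l1).2.1 = false then (pvPart l2).2.2
  else pvLoopB (pvPart l1).2.2 (pvPart l2).2.2
termination_by l2.length
decreasing_by
  have := pvPart_sep_len l2
  simp_all

def remove_common_path_alt (path1 : String) (path2 : String) : String :=
  -- the .getD "" covers the none case, where Python raises AttributeError; excluded by Pre_
  ((fix_slashes_b path1).bind fun p1 =>
    (fix_slashes_b path2).map fun p2 =>
      String.ofList (pvLoopB p1.toList p2.toList)).getD ""

-- ===== PRECONDITION & SPEC =====
-- Pre_ excludes empty path strings, on which Python's fix_slashes returns None and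
-- both A and B raise AttributeError (.split / .partition on None).
def Pre_remove_common_path (path1 : String) (path2 : String) : Prop :=
  path1 ≠ "" ∧ path2 ≠ ""
instance (path1 : String) (path2 : String) : Decidable (Pre_remove_common_path path1 path2) := by
  unfold Pre_remove_common_path; infer_instance

def pvWitness_remove_common_path : String × String := ("a/b", "a/c")

def Spec_remove_common_path (path1 : String) (path2 : String) (out : String) : Prop :=
  out = remove_common_path_alt path1 path2
instance (path1 : String) (path2 : String) (out : String) :
    Decidable (Spec_remove_common_path path1 path2 out) := by
  unfold Spec_remove_common_path; infer_instance

-- ===== CLAIM (what is proved, stated in full; the proofs are below) =====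
def Claim_equal_remove_common_path : Prop :=
  ∀ (path1 : String) (path2 : String), Dom_remove_common_path path1 path2 →
    Pre_remove_common_path path1 path2 →
    Spec_remove_common_path path1 path2 (remove_common_path path1 path2)

-- ===== LEMMAS AND PROOFS =====

-- length of the common leading run of equal elements (proof-only characterisation)
def pvPrefixLen {α : Type} [DecidableEq α] : List α → List α → Nat
  | a :: as, b :: bs => if a = b then pvPrefixLen as bs + 1 else 0
  | _, _ => 0

-- Python split('/') on code points, by structural recursion (proof-only spec)
def pvSplitC : List Char → List (List Char)
  | [] => [[]]
  | c :: rest => if c = '/' then [] :: pvSplitC rest else (pvSplitC rest).modifyHead (c :: ·)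

lemma pvSplitC_ne_nil (l : List Char) : pvSplitC l ≠ [] := by
  cases l with
  | nil => simp [pvSplitC]
  | cons c rest =>
    by_cases h : c = '/'
    · simp [pvSplitC, h]
    · simp only [pvSplitC, if_neg h]
      cases hr : pvSplitC rest with
      | nil => exact absurd hr (pvSplitC_ne_nil rest)
      | cons x xs => simp

lemma splitOn_go_eq : ∀ (fuel : Nat) (l cur : List Char) (acc : List (List Char)),
    l.length < fuel →
    PySem.Chars.splitOn.go ['/'] fuel l cur acc
      = acc.reverse ++ (pvSplitC l).modifyHead (cur.reverse ++ ·) := by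
  intro fuel
  induction fuel with
  | zero => intro l cur acc h; omega
  | succ fuel ih =>
    intro l cur acc h
    cases l with
    | nil => simp [PySem.Chars.splitOn.go, pvSplitC]
    | cons c rest =>
      by_cases hc : c = '/'
      · subst hc
        rw [show PySem.Chars.splitOn.go ['/'] (fuel + 1) ('/' :: rest) cur acc
              = PySem.Chars.splitOn.go ['/'] fuel rest [] (cur.reverse :: acc) by
            simp [PySem.Chars.splitOn.go, List.isPrefixOf]]
        rw [ih rest [] (cur.reverse :: acc) (by simpa using h)]
        obtain ⟨x, xs, hx⟩ := List.exists_cons_of_ne_nil (pvSplitC_ne_nil rest)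
        simp [pvSplitC, hx]
      · rw [show PySem.Chars.splitOn.go ['/'] (fuel + 1) (c :: rest) cur acc
              = PySem.Chars.splitOn.go ['/'] fuel rest (c :: cur) acc by
            simp only [PySem.Chars.splitOn.go, List.isPrefixOf, Bool.and_eq_true, beq_iff_eq]
            rw [if_neg (by simp [eq_comm, hc])]]
        rw [ih rest (c :: cur) acc (by simpa using h)]
        obtain ⟨x, xs, hx⟩ := List.exists_cons_of_ne_nil (pvSplitC_ne_nil rest)
        simp [pvSplitC, hc, hx]

lemma splitOn_eq_pvSplitC (l : List Char) : PySem.Chars.splitOn l ['/'] = pvSplitC l := by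
  unfold PySem.Chars.splitOn
  rw [splitOn_go_eq (l.length + 1) l [] [] (Nat.lt_succ_self _)]
  obtain ⟨x, xs, hx⟩ := List.exists_cons_of_ne_nil (pvSplitC_ne_nil l)
  simp [hx]

lemma join_pvSplitC (l : List Char) : PySem.Chars.join ['/'] (pvSplitC l) = l := by
  induction l with
  | nil => simp [pvSplitC, PySem.Chars.join_singleton]
  | cons c rest ih =>
    obtain ⟨x, xs, hx⟩ := List.exists_cons_of_ne_nil (pvSplitC_ne_nil rest)
    by_cases hc : c = '/'
    · subst hc
      rw [show pvSplitC ('/' :: rest) = [] :: pvSplitC rest by simp [pvSplitC]]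
      rw [hx, PySem.Chars.join_cons_cons, ← hx, ih]
      simp
    · rw [show pvSplitC (c :: rest) = (pvSplitC rest).modifyHead (c :: ·) by simp [pvSplitC, hc]]
      rw [hx] at ih ⊢
      cases xs with
      | nil => simp_all [PySem.Chars.join_singleton]
      | cons y ys =>
        simp only [List.modifyHead_cons]
        rw [PySem.Chars.join_cons_cons] at ih ⊢
        simp [← ih]

-- splitC through pvPart: head component, then the split of the tail if a '/' was found
lemma pvSplitC_part (l : List Char) :
    pvSplitC l = (pvPart l).1 :: (if (pvPart l).2.1 then pvSplitC (pvPart l).2.2 else []) := by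
  induction l with
  | nil => simp [pvSplitC, pvPart]
  | cons c rest ih =>
    by_cases hc : c = '/'
    · simp [pvSplitC, pvPart, hc]
    · simp only [pvSplitC, pvPart, if_neg hc]
      rw [ih]
      simp

-- the central B lemma: the partition loop computes join of path2's components past the common prefix
lemma pvLoopB_eq (l1 l2 : List Char) :
    pvLoopB l1 l2
      = PySem.Chars.join ['/'] ((pvSplitC l2).drop (pvPrefixLen (pvSplitC l1) (pvSplitC l2))) := by
  rw [pvLoopB]
  have h1 := pvSplitC_part l1
  have h2 := pvSplitC_part l2
  by_cases hne : (pvPart l1).1 ≠ (pvPart l2).1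
  · rw [if_pos hne, h1, h2]
    simp only [pvPrefixLen, if_neg hne, List.drop_zero]
    rw [← h2, join_pvSplitC]
  · rw [not_not] at hne
    rw [if_neg (by simpa using hne)]
    by_cases hs2 : (pvPart l2).2.1 = false
    · rw [if_pos hs2, h1, h2, hs2]
      simp [pvPrefixLen, hne, PySem.Chars.join_nil,
        List.drop_eq_nil_of_le]
    · rw [if_neg hs2]
      have hs2' : (pvPart l2).2.1 = true := by simpa using hs2
      by_cases hs1 : (pvPart l1).2.1 = false
      · rw [if_pos hs1, h1, h2, hs1, hs2']
        simp [pvPrefixLen, hne, join_pvSplitC]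
      · rw [if_neg hs1]
        have hs1' : (pvPart l1).2.1 = true := by simpa using hs1
        have hrec := pvLoopB_eq (pvPart l1).2.2 (pvPart l2).2.2
        rw [hrec, h1, h2, hs1', hs2']
        simp only [if_true, pvPrefixLen, if_pos hne]
        simp
termination_by l2.length
decreasing_by
  have := pvPart_sep_len l2
  simp_all

-- pvPrefixLen through an injective map
lemma pvPrefixLen_map {α β : Type} [DecidableEq α] [DecidableEq β] (f : α → β)
    (hf : Function.Injective f) :
    ∀ (xs ys : List α), pvPrefixLen (xs.map f) (ys.map f) = pvPrefixLen xs ys := by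
  intro xs
  induction xs with
  | nil => intro ys; cases ys <;> rfl
  | cons a as ih =>
    intro ys
    cases ys with
    | nil => rfl
    | cons b bs =>
      by_cases hab : a = b
      · simp [pvPrefixLen, hab, ih]
      · have : f a ≠ f b := fun h => hab (hf h)
        simp [pvPrefixLen, hab, this]

-- the whole B side, at string level, in terms of A's split/join primitives
lemma alt_core (a b : String) :
    String.ofList (pvLoopB a.toList b.toList)
      = PySem.Str.join "/"
          (((PySem.Str.split? b "/").getD []).drop
            (pvPrefixLen ((PySem.Str.split? a "/").getD []) ((PySem.Str.split? b "/").getD []))) := by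
  have hsplit : ∀ s : String, ∃ L : List String,
      PySem.Str.split? s "/" = some L ∧ L.map String.toList = pvSplitC s.toList := by
    intro s
    have hb := PySem.Str.split?_map s "/"
    rw [show ("/" : String).toList = ['/'] from rfl] at hb
    cases hL : PySem.Str.split? s "/" with
    | none =>
      rw [hL] at hb
      simp [PySem.Chars.split?] at hb
    | some L =>
      refine ⟨L, rfl, ?_⟩
      rw [hL] at hb
      simp only [Option.map_some] at hb
      rw [PySem.Chars.split?] at hb
      simp only [List.isEmpty_cons, Bool.false_eq_true, if_false] at hb
      have := Option.some.inj hb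
      rw [this, splitOn_eq_pvSplitC]
  obtain ⟨L1, hL1, hc1⟩ := hsplit a
  obtain ⟨L2, hL2, hc2⟩ := hsplit b
  rw [hL1, hL2]
  simp only [Option.getD_some]
  have hinj : Function.Injective String.toList := by
    intro x y h
    have hxy : String.ofList x.toList = String.ofList y.toList := by rw [h]
    simpa [String.ofList_toList] using hxy
  have hk : pvPrefixLen L1 L2 = pvPrefixLen (pvSplitC a.toList) (pvSplitC b.toList) := by
    rw [← hc1, ← hc2, pvPrefixLen_map String.toList hinj]
  apply hinj
  rw [PySem.Str.toList_join, String.toList_ofList, pvLoopB_eq, hk, ← hc2, List.map_drop]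
  rfl

-- ===== A-side loop lemmas (unchanged characterisation of A's flag loop) =====

-- once skip is false, A's loop appends every remaining component
lemma loopA_false (s1 s2 : List String) :
    ∀ (fuel i : Nat) (acc : List String), s2.length - i ≤ fuel → i ≤ s2.length →
    ((PySem.List.pyRange (i : Int) (s2.length : Int) 1).foldl (pvBodyA s1 s2) (false, acc)).2
      = acc ++ s2.drop i := by
  intro fuel
  induction fuel with
  | zero =>
    intro i acc hf hi
    have hlen : s2.length = i := by omega
    rw [PySem.List.pyRange_one_eq_nil (by exact_mod_cast Nat.le_of_eq hlen)]
    simp [hlen]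
  | succ fuel ih =>
    intro i acc hf hi
    rcases Nat.eq_or_lt_of_le hi with h | h
    · rw [PySem.List.pyRange_one_eq_nil (by exact_mod_cast Nat.le_of_eq h.symm)]
      simp [h]
    · rw [PySem.List.pyRange_one_cons (by exact_mod_cast h)]
      simp only [List.foldl_cons]
      have hbody : pvBodyA s1 s2 (false, acc) (i : Int)
          = (false, acc ++ [PySem.List.pyGetD s2 (i : Int) ""]) := by
        simp [pvBodyA]
      rw [hbody]
      have : ((i : Int) + 1) = ((i + 1 : Nat) : Int) := by push_cast; ring
      rw [this, ih (i + 1) _ (by omega) (by omega)]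
      rw [PySem.List.pyGetD_natCast, List.getD_eq_getElem?_getD,
        List.getElem?_eq_getElem h, Option.getD_some,
        List.drop_eq_getElem_cons h]
      simp

-- with skip still true at index i, A's loop produces acc ++ drop (i + prefixLen of the tails)
lemma loopA_true (s1 s2 : List String) :
    ∀ (fuel i : Nat) (acc : List String), s2.length - i ≤ fuel → i ≤ s2.length →
    ((PySem.List.pyRange (i : Int) (s2.length : Int) 1).foldl (pvBodyA s1 s2) (true, acc)).2
      = acc ++ s2.drop (i + pvPrefixLen (s1.drop i) (s2.drop i)) := by
  intro fuel
  induction fuel with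
  | zero =>
    intro i acc hf hi
    have hlen : s2.length = i := by omega
    rw [PySem.List.pyRange_one_eq_nil (by exact_mod_cast Nat.le_of_eq hlen)]
    simp [hlen, List.drop_eq_nil_of_le, pvPrefixLen]
  | succ fuel ih =>
    intro i acc hf hi
    rcases Nat.eq_or_lt_of_le hi with h | h
    · rw [PySem.List.pyRange_one_eq_nil (by exact_mod_cast Nat.le_of_eq h.symm)]
      have : s2.drop i = [] := by simp [h]
      simp [this, pvPrefixLen]
    · rw [PySem.List.pyRange_one_cons (by exact_mod_cast h)]
      simp only [List.foldl_cons]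
      have hdrop2 : s2.drop i = s2[i] :: s2.drop (i + 1) := List.drop_eq_getElem_cons h
      have hget2 : PySem.List.pyGetD s2 (i : Int) "" = s2[i] := by
        rw [PySem.List.pyGetD_natCast, List.getD_eq_getElem?_getD,
          List.getElem?_eq_getElem h, Option.getD_some]
      by_cases h1 : i < s1.length
      · have hdrop1 : s1.drop i = s1[i] :: s1.drop (i + 1) := List.drop_eq_getElem_cons h1
        have hget1 : PySem.List.pyGetD s1 (i : Int) "" = s1[i] := by
          rw [PySem.List.pyGetD_natCast, List.getD_eq_getElem?_getD,
            List.getElem?_eq_getElem h1, Option.getD_some]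
        by_cases heq : s1[i] = s2[i]
        · -- heads equal: skip stays true
          have hbody : pvBodyA s1 s2 (true, acc) (i : Int) = (true, acc) := by
            simp only [pvBodyA, hget1, hget2]
            have c1 : ((s1.length : Int) > (i : Int)) := by exact_mod_cast h1
            have c2 : ¬ ((s1.length : Int) - 1 < (i : Int)) := by omega
            simp [c1, c2, heq]
          rw [hbody]
          have hcast : ((i : Int) + 1) = ((i + 1 : Nat) : Int) := by push_cast; ring
          rw [hcast, ih (i + 1) _ (by omega) (by omega)]
          rw [hdrop1, hdrop2]
          simp only [pvPrefixLen, if_pos heq]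
          congr 2
          omega
        · -- heads differ: skip becomes false, append s2[i], rest all appended
          have hbody : pvBodyA s1 s2 (true, acc) (i : Int) = (false, acc ++ [s2[i]]) := by
            simp only [pvBodyA, hget1, hget2]
            have c1 : ((s1.length : Int) > (i : Int)) := by exact_mod_cast h1
            simp [c1, heq]
          rw [hbody]
          have hcast : ((i : Int) + 1) = ((i + 1 : Nat) : Int) := by push_cast; ring
          rw [hcast, loopA_false s1 s2 (s2.length - (i + 1)) (i + 1) _ (by omega) (by omega)]
          have hk0 : pvPrefixLen (s1.drop i) (s2.drop i) = 0 := by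
            rw [hdrop1, hdrop2]; simp [pvPrefixLen, heq]
          rw [hk0]
          simp only [Nat.add_zero]
          rw [hdrop2, List.append_assoc]
          rfl
      · -- past the end of s1: skip becomes false
        have hdrop1 : s1.drop i = [] := by
          apply List.drop_eq_nil_of_le; omega
        have hbody : pvBodyA s1 s2 (true, acc) (i : Int) = (false, acc ++ [s2[i]]) := by
          simp only [pvBodyA, hget2]
          have c2 : ((s1.length : Int) - 1 < (i : Int)) := by omega
          simp [c2]
        rw [hbody]
        have hcast : ((i : Int) + 1) = ((i + 1 : Nat) : Int) := by push_cast; ring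
        rw [hcast, loopA_false s1 s2 (s2.length - (i + 1)) (i + 1) _ (by omega) (by omega)]
        have hk0 : pvPrefixLen (s1.drop i) (s2.drop i) = 0 := by
          rw [hdrop1, hdrop2]; simp [pvPrefixLen]
        rw [hk0]
        simp only [Nat.add_zero]
        rw [hdrop2, List.append_assoc]
        rfl

-- ===== VERDICT (by name: the statement is the Claim_ definition above) =====
theorem remove_common_path_spec : Claim_equal_remove_common_path := by
  intro path1 path2 _ hpre
  unfold Spec_remove_common_path remove_common_path remove_common_path_alt
  obtain ⟨h1, h2⟩ := hpre
  simp only [fix_slashes, fix_slashes_b, if_neg h1, if_neg h2, Option.bind_some,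
    Option.map_some, Option.getD_some]
  have := loopA_true
    ((PySem.Str.split? (PySem.Str.replace (PySem.Str.replace path1 "\\" "/") "//" "/") "/").getD [])
    ((PySem.Str.split? (PySem.Str.replace (PySem.Str.replace path2 "\\" "/") "//" "/") "/").getD [])
    ((PySem.Str.split? (PySem.Str.replace (PySem.Str.replace path2 "\\" "/") "//" "/") "/").getD []).length
    0 [] (by omega) (by omega)
  simp only [Nat.cast_zero, List.drop_zero, List.nil_append, zero_add] at this
  rw [this, alt_core]
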